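-- pv_equiv track=rewrite | github.com/IvanKa2x2/BBLine | export/insert_flags.py | mark_tilt_tags
-- ===== SOURCE A (Python) =====
-- from collections import deque
--
-- def mark_tilt_tags(hero_hands):
--     """
--     Помечаем tilt_tag, если подряд ≥3 рук с отрицательным net_bb.
--     hero_hands = list[(hand_id, date_ts, net_bb)]
--     """
--     tilt_hand_ids = set()
--     streak = deque()  # (hand_id, net_bb)
--     for hand_id, _, net in sorted(hero_hands, key=lambda x: x[1]):  # по времени
--         streak.append((hand_id, net))
--         if len(streak) > 3:
--             streak.popleft()
--         if len(streak) == 3 and all(net_bb < 0 for _, net_bb in streak):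
--             tilt_hand_ids.update(h for h, _ in streak)
--     return tilt_hand_ids
-- ===== SOURCE B (Python) =====
-- def mark_tilt_tags(hero_hands):
--     """
--     Помечаем tilt_tag, если подряд ≥3 рук с отрицательным net_bb.
--     hero_hands = list[(hand_id, date_ts, net_bb)]
--     """
--     tilt_hand_ids = set()
--     run = []  # hand_ids of the current run of consecutive losing hands
--     for hand_id, _, net in sorted(hero_hands, key=lambda x: x[1]):  # по времени
--         if net < 0:
--             run.append(hand_id)
--         else:
--             if len(run) >= 3:
--                 tilt_hand_ids.update(run)
--             run = []
--     if len(run) >= 3: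
--         tilt_hand_ids.update(run)
--     return tilt_hand_ids
-- ===== Notes on version B (the rewrite author's own statement) =====
-- stated objective: simpler
-- what changed: Replaced the sliding 3-window deque with all-negative test per hand by a single accumulator that collects each maximal run of consecutive losing hands and flushes it into the result only when the run length is >= 3.
import Mathlib
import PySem

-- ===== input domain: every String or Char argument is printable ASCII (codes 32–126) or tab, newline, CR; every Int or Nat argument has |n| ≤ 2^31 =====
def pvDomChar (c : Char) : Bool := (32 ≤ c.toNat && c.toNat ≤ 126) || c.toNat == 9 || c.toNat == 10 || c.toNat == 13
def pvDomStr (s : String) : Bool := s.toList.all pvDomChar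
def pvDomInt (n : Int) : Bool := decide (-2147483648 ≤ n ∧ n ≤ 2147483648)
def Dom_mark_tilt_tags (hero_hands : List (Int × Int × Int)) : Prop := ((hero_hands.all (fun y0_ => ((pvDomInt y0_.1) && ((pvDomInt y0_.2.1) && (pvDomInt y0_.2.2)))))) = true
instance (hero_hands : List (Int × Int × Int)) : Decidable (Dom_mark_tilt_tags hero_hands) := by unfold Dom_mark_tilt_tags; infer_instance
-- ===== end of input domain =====

-- B replaces A's sliding 3-window deque by a grouping pass that collects each maximal
-- run of consecutive losing hands and flushes it when its length is ≥ 3 (objective: simpler).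

-- ===== PORT A =====
-- for hand_id, _, net in sorted(...): streak.append; popleft if >3; mark window when 3 negatives
def loopA : List (Int × Int × Int) → PySem.Set Int → List (Int × Int) → PySem.Set Int
  | [], tilt, _ => tilt
  | (hand_id, _, net) :: rest, tilt, streak =>
    let streak1 := streak ++ [(hand_id, net)]
    let streak2 := if 3 < streak1.length then streak1.tail else streak1
    let tilt' := if streak2.length = 3 ∧ streak2.all (fun q => decide (q.2 < 0)) then
        PySem.Set.update tilt (streak2.map Prod.fst) else tilt
    loopA rest tilt' streak2

def mark_tilt_tags (hero_hands : List (Int × Int × Int)) : List Int :=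
  loopA (PySem.List.sorted hero_hands (fun x => x.2.1) false) PySem.Set.empty []

-- ===== PORT B =====
-- if len(run) >= 3: tilt_hand_ids.update(run)
def flushB (res : PySem.Set Int) (run : List Int) : PySem.Set Int :=
  if 3 ≤ run.length then PySem.Set.update res run else res

-- for hand_id, _, net in sorted(...): extend the current losing run, or flush and reset
def loopB : List (Int × Int × Int) → PySem.Set Int → List Int → PySem.Set Int
  | [], res, run => flushB res run
  | (hand_id, _, net) :: rest, res, run =>
    if net < 0 then loopB rest res (run ++ [hand_id])
    else loopB rest (flushB res run) []

def mark_tilt_tags_alt (hero_hands : List (Int × Int × Int)) : List Int :=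
  loopB (PySem.List.sorted hero_hands (fun x => x.2.1) false) PySem.Set.empty []

-- ===== PRECONDITION & SPEC =====
def Spec_mark_tilt_tags (hero_hands : List (Int × Int × Int)) (out : List Int) : Prop := out = mark_tilt_tags_alt hero_hands
instance (hero_hands : List (Int × Int × Int)) (out : List Int) : Decidable (Spec_mark_tilt_tags hero_hands out) := by unfold Spec_mark_tilt_tags; infer_instance

-- ===== CLAIM (what is proved, stated in full; the proofs are below) =====
def Claim_equal_mark_tilt_tags : Prop := ∀ (hero_hands : List (Int × Int × Int)), Dom_mark_tilt_tags hero_hands → Spec_mark_tilt_tags hero_hands (mark_tilt_tags hero_hands)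

-- ===== LEMMAS AND PROOFS =====

-- the maximal all-negative suffix of a list of (id, net) pairs
def negsuf (l : List (Int × Int)) : List (Int × Int) :=
  (l.reverse.takeWhile (fun p => decide (p.2 < 0))).reverse

lemma negsuf_snoc_neg (l : List (Int × Int)) (x : Int × Int) (h : x.2 < 0) :
    negsuf (l ++ [x]) = negsuf l ++ [x] := by
  simp [negsuf, h]

lemma negsuf_snoc_nonneg (l : List (Int × Int)) (x : Int × Int) (h : ¬ x.2 < 0) :
    negsuf (l ++ [x]) = [] := by
  simp [negsuf, h]

lemma negsuf_suffix (l : List (Int × Int)) : negsuf l <:+ l := by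
  have := List.takeWhile_prefix (l := l.reverse) (p := fun p => decide (p.2 < 0))
  have h2 := this.reverse
  simpa [negsuf] using h2

lemma negsuf_length_le (l : List (Int × Int)) : (negsuf l).length ≤ l.length :=
  (negsuf_suffix l).length_le

lemma mem_negsuf_neg (l : List (Int × Int)) (p : Int × Int) (h : p ∈ negsuf l) : p.2 < 0 := by
  have : p ∈ l.reverse.takeWhile (fun p => decide (p.2 < 0)) := by
    simpa [negsuf] using h
  have := List.mem_takeWhile_imp this
  simpa using this

lemma prefix_takeWhile {α : Type} (pred : α → Bool) :
    ∀ (p m : List α), p <+: m → (∀ x ∈ p, pred x) → p <+: m.takeWhile pred := by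
  intro p
  induction p with
  | nil => intro m _ _; exact List.nil_prefix
  | cons a p ih =>
    intro m h hall
    obtain ⟨t, rfl⟩ := h
    have : pred a := hall a (by simp)
    simp only [List.cons_append, List.takeWhile_cons, this, if_true]
    exact (List.prefix_cons_inj a).2 (ih (p ++ t) (List.prefix_append p t)
      (fun x hx => hall x (by simp [hx])))

lemma negsuf_maximal (l s : List (Int × Int)) (h : s <:+ l) (hneg : ∀ p ∈ s, p.2 < 0) :
    s.length ≤ (negsuf l).length := by
  have hp : s.reverse <+: l.reverse := List.reverse_prefix.2 (by simpa using h)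
  have := prefix_takeWhile (fun p => decide (p.2 < 0)) s.reverse l.reverse hp
    (fun x hx => by simpa using hneg x (by simpa using hx))
  have hl := this.length_le
  simpa [negsuf] using hl

lemma negsuf_of_all_neg (l : List (Int × Int)) (h : ∀ p ∈ l, p.2 < 0) : negsuf l = l := by
  have h1 := negsuf_length_le l
  have h2 := negsuf_maximal l l List.suffix_rfl h
  have := (negsuf_suffix l).eq_of_length (le_antisymm h1 h2)
  exact this

lemma suffix_eq_of_length {α : Type} {s t l : List α} (hs : s <:+ l) (ht : t <:+ l)
    (h : s.length = t.length) : s = t := by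
  obtain ⟨u, rfl⟩ := hs
  obtain ⟨v, hv⟩ := ht
  have hlen : u.length = v.length := by
    have := congrArg List.length hv
    simp at this; omega
  have : u ++ s = v ++ t := hv.symm
  have := List.append_inj this hlen
  exact this.2

lemma negsuf_tail (l : List (Int × Int)) (h : (negsuf l).length < l.length) :
    negsuf l.tail = negsuf l := by
  cases l with
  | nil => simp at h
  | cons y t =>
    have hsuf : negsuf (y :: t) <:+ t := by
      rcases List.suffix_cons_iff.1 (negsuf_suffix (y :: t)) with heq | hsuf
      · exfalso; rw [heq] at h; simp at h
      · exact hsuf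
    have h1 : (negsuf (y :: t)).length ≤ (negsuf t).length :=
      negsuf_maximal t _ hsuf (fun p hp => mem_negsuf_neg _ p hp)
    have h2 : (negsuf t).length ≤ (negsuf (y :: t)).length :=
      negsuf_maximal (y :: t) _ ((negsuf_suffix t).trans (List.suffix_cons y t))
        (fun p hp => mem_negsuf_neg _ p hp)
    simp only [List.tail_cons]
    exact suffix_eq_of_length (negsuf_suffix t) hsuf (le_antisymm h2 h1)

lemma update_of_subset (xs : List Int) : ∀ (s : PySem.Set Int), (∀ x ∈ xs, x ∈ s) →
    PySem.Set.update s xs = s := by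
  induction xs with
  | nil => intro s _; rfl
  | cons a xs ih =>
    intro s h
    rw [PySem.Set.update_cons, PySem.Set.add_of_mem (h a (by simp))]
    exact ih s (fun x hx => h x (by simp [hx]))

-- invariant relating A's (tilt, streak) to B's (res, run) after the same prefix
def LoopInv (tilt res : PySem.Set Int) (streak : List (Int × Int)) (run : List Int) : Prop :=
  (run.length < 3 ∧ tilt = res ∧ (negsuf streak).map Prod.fst = run)
  ∨ (3 ≤ run.length ∧ tilt = PySem.Set.update res run ∧ streak.length = 3 ∧
      (∀ p ∈ streak, p.2 < 0 ∧ p.1 ∈ run))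

lemma loop_eq : ∀ (l : List (Int × Int × Int)) (tilt res : PySem.Set Int)
    (streak : List (Int × Int)) (run : List Int),
    streak.length ≤ 3 → LoopInv tilt res streak run →
    loopA l tilt streak = loopB l res run := by
  intro l
  induction l with
  | nil =>
    intro tilt res streak run _ hinv
    rcases hinv with ⟨hlt, rfl, _⟩ | ⟨hge, rfl, _, _⟩
    · simp [loopA, loopB, flushB, Nat.not_le.2 hlt]
    · simp [loopA, loopB, flushB, hge]
  | cons x rest ih =>
    obtain ⟨hid, ts, net⟩ := x
    intro tilt res streak run hlen hinv
    -- characterize A's updated window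
    set X : List (Int × Int) := if streak.length = 3 then streak.tail else streak with hX
    have hs2eq : (if 3 < (streak ++ [(hid, net)]).length then (streak ++ [(hid, net)]).tail
        else streak ++ [(hid, net)]) = X ++ [(hid, net)] := by
      by_cases h3 : streak.length = 3
      · cases streak with
        | nil => simp at h3
        | cons a t => simp_all
      · have : ¬ 3 < streak.length + 1 := by omega
        simp [hX, h3, this]
    have hA : loopA ((hid, ts, net) :: rest) tilt streak =
        loopA rest (if (X ++ [(hid, net)]).length = 3 ∧
            (X ++ [(hid, net)]).all (fun q => decide (q.2 < 0)) then
          PySem.Set.update tilt ((X ++ [(hid, net)]).map Prod.fst) else tilt) (X ++ [(hid, net)]) := by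
      simp only [loopA, hs2eq]
    have hXlen : X.length ≤ 2 := by
      by_cases h3 : streak.length = 3 <;> simp [hX, h3] <;> omega
    have hs2len : (X ++ [(hid, net)]).length ≤ 3 := by simp; omega
    rcases hinv with ⟨hlt, hteq, hns⟩ | ⟨hge, hteq, hs3, hmem⟩
    all_goals subst hteq
    · -- case 1: no pending qualifying run, tilt = res
      have hnslen : (negsuf streak).length = run.length := by
        rw [← hns]; simp
      have hXns : negsuf X = negsuf streak := by
        by_cases h3 : streak.length = 3
        · simp only [hX, if_pos h3]
          exact negsuf_tail streak (by omega)
        · simp [hX, h3]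
      by_cases hneg : net < 0
      · -- losing hand extends the run
        have hnss2 : negsuf (X ++ [(hid, net)]) = negsuf streak ++ [(hid, net)] := by
          rw [negsuf_snoc_neg _ _ hneg, hXns]
        by_cases hr2 : run.length = 2
        · -- the run reaches length 3: A's window triggers now
          have hXeq : X = negsuf streak := by
            by_cases h3 : streak.length = 3
            · simp only [hX, if_pos h3]
              exact (suffix_eq_of_length (List.tail_suffix streak) (negsuf_suffix streak)
                (by simp [hnslen, hr2, h3])).symm ▸ rfl
            · have hle := negsuf_length_le streak
              have : (negsuf streak).length = streak.length := by
                rw [hnslen, hr2]; rw [hnslen, hr2] at hle; omega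
              simp only [hX, if_neg h3]
              exact (suffix_eq_of_length List.suffix_rfl (negsuf_suffix streak) this.symm)
          have hcond : ((X ++ [(hid, net)]).length = 3 ∧
              (X ++ [(hid, net)]).all (fun q => decide (q.2 < 0))) := by
            constructor
            · simp [hXeq]; omega
            · simp only [List.all_eq_true, decide_eq_true_eq]
              intro q hq
              rcases List.mem_append.1 hq with hq | hq
              · exact mem_negsuf_neg _ q (hXeq ▸ hq)
              · simp at hq; subst hq; exact hneg
          rw [hA, if_pos hcond]
          show _ = loopB _ _ _
          simp only [loopB, if_pos hneg]
          apply ih _ _ _ _ hs2len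
          refine Or.inr ⟨by simp [hr2], ?_, by simp [hXeq, hnslen, hr2], ?_⟩
          · congr 1
            simp [hXeq, ← hns]
          · intro p hp
            rcases List.mem_append.1 hp with hp | hp
            · refine ⟨mem_negsuf_neg _ p (hXeq ▸ hp), ?_⟩
              have : p.1 ∈ run := by
                rw [← hns]; exact List.mem_map_of_mem (hXeq ▸ hp)
              simp [this]
            · simp at hp; subst hp; simp [hneg]
        · -- run stays shorter than 3: no trigger
          have hcond : ¬ ((X ++ [(hid, net)]).length = 3 ∧
              (X ++ [(hid, net)]).all (fun q => decide (q.2 < 0))) := by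
            rintro ⟨hl3, hall⟩
            have hall' : ∀ q ∈ X ++ [(hid, net)], q.2 < 0 := by
              intro q hq
              have := List.all_eq_true.1 hall q hq
              simpa using this
            have := negsuf_of_all_neg _ hall'
            have hlen2 : (negsuf (X ++ [(hid, net)])).length = run.length + 1 := by
              rw [hnss2]; simp [hnslen]
            rw [this] at hlen2
            omega
          rw [hA, if_neg hcond]
          show _ = loopB _ _ _
          simp only [loopB, if_pos hneg]
          apply ih _ _ _ _ hs2len
          refine Or.inl ⟨by simp; omega, rfl, ?_⟩
          rw [hnss2]
          simp [hns]
      · -- non-losing hand: B discards the short run, A cannot trigger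
        have hcond : ¬ ((X ++ [(hid, net)]).length = 3 ∧
            (X ++ [(hid, net)]).all (fun q => decide (q.2 < 0))) := by
          rintro ⟨-, hall⟩
          have : ((hid, net) : Int × Int).2 < 0 := by
            have := List.all_eq_true.1 hall (hid, net) (by simp)
            simpa using this
          exact hneg this
        rw [hA, if_neg hcond]
        show _ = loopB _ _ _
        simp only [loopB, if_neg hneg]
        have hflush : flushB tilt run = tilt := by
          simp [flushB, Nat.not_le.2 hlt]
        rw [hflush]
        apply ih _ _ _ _ hs2len
        exact Or.inl ⟨by simp, rfl, by rw [negsuf_snoc_nonneg _ _ hneg]; simp⟩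
    · -- case 2: a qualifying run is pending, tilt = update res run
      have hX3 : X = streak.tail := by simp [hX, hs3]
      have htailmem : ∀ p ∈ X, p.2 < 0 ∧ p.1 ∈ run := by
        intro p hp
        exact hmem p (hX3 ▸ hp |> List.mem_of_mem_tail)
      by_cases hneg : net < 0
      · -- the run continues: A's window triggers again, adding only the new id
        have hcond : ((X ++ [(hid, net)]).length = 3 ∧
            (X ++ [(hid, net)]).all (fun q => decide (q.2 < 0))) := by
          constructor
          · simp [hX3, hs3]
          · simp only [List.all_eq_true, decide_eq_true_eq]
            intro q hq
            rcases List.mem_append.1 hq with hq | hq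
            · exact (htailmem q hq).1
            · simp at hq; subst hq; exact hneg
        rw [hA, if_pos hcond]
        show _ = loopB _ _ _
        simp only [loopB, if_pos hneg]
        have hupd : PySem.Set.update (PySem.Set.update res run) ((X ++ [(hid, net)]).map Prod.fst)
            = PySem.Set.update res (run ++ [hid]) := by
          rw [List.map_append, PySem.Set.update_append, PySem.Set.update_append]
          congr 1
          apply update_of_subset
          intro x hx
          obtain ⟨p, hp, rfl⟩ := List.mem_map.1 hx
          exact (PySem.Set.mem_update _ _ _).2 (Or.inr (htailmem p hp).2)
        rw [hupd]
        apply ih _ _ _ _ hs2len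
        refine Or.inr ⟨by simp; omega, rfl, by simp [hX3, hs3], ?_⟩
        intro p hp
        rcases List.mem_append.1 hp with hp | hp
        · exact ⟨(htailmem p hp).1, by simp [(htailmem p hp).2]⟩
        · simp at hp; subst hp; simp [hneg]
      · -- run ends: B flushes exactly what A has already collected
        have hcond : ¬ ((X ++ [(hid, net)]).length = 3 ∧
            (X ++ [(hid, net)]).all (fun q => decide (q.2 < 0))) := by
          rintro ⟨-, hall⟩
          have : ((hid, net) : Int × Int).2 < 0 := by
            have := List.all_eq_true.1 hall (hid, net) (by simp)
            simpa using this
          exact hneg this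
        rw [hA, if_neg hcond]
        show _ = loopB _ _ _
        simp only [loopB, if_neg hneg]
        have hflush : flushB res run = PySem.Set.update res run := by
          simp [flushB, hge]
        rw [hflush]
        apply ih _ _ _ _ hs2len
        exact Or.inl ⟨by simp, rfl, by rw [negsuf_snoc_nonneg _ _ hneg]; simp⟩

-- ===== VERDICT (by name: the statement is the Claim_ definition above) =====
theorem mark_tilt_tags_spec : Claim_equal_mark_tilt_tags := by
  intro hh _
  unfold Spec_mark_tilt_tags mark_tilt_tags mark_tilt_tags_alt
  exact loop_eq _ _ _ [] [] (by simp) (Or.inl ⟨by decide, rfl, rfl⟩)
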